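-- pv_equiv track=rewrite | github.com/navysum/cybersecurity-portfolio | 01-password-checker/password_checker.py | has_simple_sequence
-- ===== SOURCE A (Python) =====
-- def has_simple_sequence(pw: str, min_len: int = 4) -> bool:
--     # Detect increasing/decreasing ASCII sequences like "abcd", "fedc", "6789"
--     if len(pw) < min_len:
--         return False
--
--     def is_seq(a: str, b: str) -> int:
--         return ord(b) - ord(a)
--
--     pw2 = pw
--     for i in range(len(pw2) - min_len + 1):
--         window = pw2[i:i + min_len]
--         diffs = [is_seq(window[j], window[j + 1]) for j in range(min_len - 1)]
--         if all(d == 1 for d in diffs) or all(d == -1 for d in diffs):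
--             return True
--     return False
-- ===== SOURCE B (Python) =====
-- def has_simple_sequence(pw: str, min_len: int = 4) -> bool:
--     # Single left-to-right pass tracking current ascending/descending run lengths.
--     if len(pw) < min_len:
--         return False
--     if min_len <= 1:
--         # any window of length <= 1 vacuously counts as a sequence
--         return True
--     inc = dec = 1
--     for a, b in zip(pw, pw[1:]):
--         d = ord(b) - ord(a)
--         inc = inc + 1 if d == 1 else 1
--         dec = dec + 1 if d == -1 else 1
--         if inc >= min_len or dec >= min_len:
--             return True
--     return False
-- ===== Notes on version B (the rewrite author's own statement) =====
-- stated objective: faster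
-- what changed: Replaced the sliding-window scan (each window rebuilt and its diff list checked) by a single left-to-right pass that maintains the current ascending and descending run lengths and succeeds once either reaches min_len.
import Mathlib
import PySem

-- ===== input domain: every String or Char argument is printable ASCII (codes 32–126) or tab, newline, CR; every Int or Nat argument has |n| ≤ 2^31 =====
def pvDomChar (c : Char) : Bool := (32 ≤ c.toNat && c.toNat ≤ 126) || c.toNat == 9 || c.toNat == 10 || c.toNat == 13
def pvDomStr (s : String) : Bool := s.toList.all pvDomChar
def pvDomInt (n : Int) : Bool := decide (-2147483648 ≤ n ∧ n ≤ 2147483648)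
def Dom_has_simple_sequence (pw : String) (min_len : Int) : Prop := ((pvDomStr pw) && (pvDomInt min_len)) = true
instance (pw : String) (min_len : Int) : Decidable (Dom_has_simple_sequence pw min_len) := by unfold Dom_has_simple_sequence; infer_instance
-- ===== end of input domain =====

-- B replaces A's O(n*min_len) sliding-window scan by a single O(n) pass tracking the
-- current ascending/descending run lengths (objective: faster, asymptotic).

-- ===== PORT A =====
-- ord(b) - ord(a)  (Python's is_seq helper)
def pvIsSeq (a b : Char) : Int := (b.toNat : Int) - (a.toNat : Int)

-- body of A's loop for one window start i: build the window, its diff list, test it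
def pvWindowCheck (pw2 : List Char) (min_len : Int) (i : Int) : Bool :=
  let window := PySem.List.slice pw2 (some i) (some (i + min_len))
  -- window[j] is always in range on the reachable indices, so pyGetD's default is never used
  let diffs := (PySem.List.pyRange 0 (min_len - 1) 1).map
    (fun j => pvIsSeq (PySem.List.pyGetD window j ' ') (PySem.List.pyGetD window (j + 1) ' '))
  (diffs.all (fun d => d == 1) || diffs.all (fun d => d == -1))

def has_simple_sequence (pw : String) (min_len : Int) : Bool :=
  let pw2 := pw.toList
  if (pw2.length : Int) < min_len then false
  else
    (PySem.List.pyRange 0 ((pw2.length : Int) - min_len + 1) 1).foldl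
      (fun acc i => if acc then acc else pvWindowCheck pw2 min_len i)
      false

-- ===== PORT B =====
-- one step of B's loop body: update the two run counters from the diff d, set the found flag
def pvStep (m : Int) (st : Int × Int × Bool) (d : Int) : Int × Int × Bool :=
  if st.2.2 then st
  else
    let inc := if d = 1 then st.1 + 1 else 1
    let dec := if d = -1 then st.2.1 + 1 else 1
    (inc, dec, decide (m ≤ inc) || decide (m ≤ dec))

def has_simple_sequence_alt (pw : String) (min_len : Int) : Bool :=
  let cs := pw.toList
  if (cs.length : Int) < min_len then false
  else if min_len ≤ 1 then true
  else
    ((cs.zip cs.tail).foldl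
      (fun st ab => pvStep min_len st (pvIsSeq ab.1 ab.2))
      ((1 : Int), (1 : Int), false)).2.2

-- ===== PRECONDITION & SPEC =====
def Spec_has_simple_sequence (pw : String) (min_len : Int) (out : Bool) : Prop := out = has_simple_sequence_alt pw min_len
instance (pw : String) (min_len : Int) (out : Bool) : Decidable (Spec_has_simple_sequence pw min_len out) := by unfold Spec_has_simple_sequence; infer_instance

-- ===== CLAIM (what is proved, stated in full; the proofs are below) =====
def Claim_equal_has_simple_sequence : Prop := ∀ (pw : String) (min_len : Int), Dom_has_simple_sequence pw min_len → Spec_has_simple_sequence pw min_len (has_simple_sequence pw min_len)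

-- ===== LEMMAS AND PROOFS =====

-- the list of adjacent ASCII differences of cs
def pvDiffs (cs : List Char) : List Int := (cs.zip cs.tail).map (fun ab => pvIsSeq ab.1 ab.2)

-- length of the maximal constant-v suffix of l
def pvRun (l : List Int) (v : Int) : Nat := (l.reverse.takeWhile (fun d => d == v)).length

-- the K-window of l starting at t is constantly v
def pvWin (l : List Int) (t K : Nat) (v : Int) : Bool := ((l.drop t).take K).all (fun d => d == v)

-- some K-window of l is constantly 1 or constantly -1
def pvFound (l : List Int) (K : Nat) : Prop :=
  ∃ t, t + K ≤ l.length ∧ (pvWin l t K 1 = true ∨ pvWin l t K (-1) = true)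

theorem pv_foldl_or {α : Type} (p : α → Bool) :
    ∀ (l : List α) (b : Bool), l.foldl (fun acc i => if acc then acc else p i) b = (b || l.any p) := by
  intro l
  induction l with
  | nil => intro b; simp
  | cons a l ih =>
    intro b
    cases b <;> simp [List.foldl_cons, ih]

theorem pv_run_append (l : List Int) (x v : Int) :
    pvRun (l ++ [x]) v = if x = v then pvRun l v + 1 else 0 := by
  unfold pvRun
  rw [List.reverse_append]
  by_cases h : x = v <;> simp [h]

theorem pv_takeWhile_len_ge (p : Int → Bool) :
    ∀ (xs : List Int) (K : Nat), K ≤ (xs.takeWhile p).length ↔ K ≤ xs.length ∧ (xs.take K).all p = true := by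
  intro xs
  induction xs with
  | nil => intro K; simp
  | cons a xs ih =>
    intro K
    cases K with
    | zero => simp
    | succ K =>
      by_cases hp : p a
      · simp [hp, ih K]
      · simp [hp]

theorem pv_run_ge (l : List Int) (v : Int) (K : Nat) :
    K ≤ pvRun l v ↔ K ≤ l.length ∧ pvWin l (l.length - K) K v = true := by
  unfold pvRun pvWin
  rw [pv_takeWhile_len_ge]
  constructor
  · rintro ⟨h1, h2⟩
    simp at h1
    refine ⟨h1, ?_⟩
    rw [List.take_reverse] at h2
    rw [List.all_reverse] at h2
    have hfull : (l.drop (l.length - K)).take K = l.drop (l.length - K) := by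
      apply List.take_of_length_le
      simp
      omega
    rw [hfull]
    simpa using h2
  · rintro ⟨h1, h2⟩
    refine ⟨by simpa using h1, ?_⟩
    rw [List.take_reverse, List.all_reverse]
    have hfull : (l.drop (l.length - K)).take K = l.drop (l.length - K) := by
      apply List.take_of_length_le
      simp
      omega
    rw [hfull] at h2
    simpa using h2

theorem pv_win_append (l : List Int) (x v : Int) (t K : Nat) (h : t + K ≤ l.length) :
    pvWin (l ++ [x]) t K v = pvWin l t K v := by
  unfold pvWin
  rw [List.drop_append_of_le_length (by omega),
      List.take_append_of_le_length (by simp; omega)]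

theorem pv_found_mono (l : List Int) (x : Int) (K : Nat) (h : pvFound l K) : pvFound (l ++ [x]) K := by
  obtain ⟨t, ht, hw⟩ := h
  exact ⟨t, by simp; omega, by rw [pv_win_append l x 1 t K ht, pv_win_append l x (-1) t K ht]; exact hw⟩

theorem pv_found_append (l : List Int) (x : Int) (K : Nat) (hK : 1 ≤ K) :
    pvFound (l ++ [x]) K ↔ pvFound l K ∨ K ≤ pvRun (l ++ [x]) 1 ∨ K ≤ pvRun (l ++ [x]) (-1) := by
  constructor
  · rintro ⟨t, ht, hw⟩
    simp at ht
    by_cases hc : t + K ≤ l.length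
    · left
      exact ⟨t, hc, by rw [← pv_win_append l x 1 t K hc, ← pv_win_append l x (-1) t K hc]; exact hw⟩
    · right
      have hlen : (l ++ [x]).length = l.length + 1 := by simp
      have ht' : (l ++ [x]).length - K = t := by omega
      rcases hw with hw | hw
      · left;  rw [pv_run_ge]; exact ⟨by omega, ht' ▸ hw⟩
      · right; rw [pv_run_ge]; exact ⟨by omega, ht' ▸ hw⟩
  · rintro (h | h | h)
    · exact pv_found_mono l x K h
    · rw [pv_run_ge] at h
      exact ⟨(l ++ [x]).length - K, by omega, Or.inl h.2⟩
    · rw [pv_run_ge] at h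
      exact ⟨(l ++ [x]).length - K, by omega, Or.inr h.2⟩

theorem pv_scanInv (m : Int) (K : Nat) (hm : m = (K : Int) + 1) (hK : 1 ≤ K) (l : List Int) :
    ((l.foldl (pvStep m) (1, 1, false)).2.2 = true ↔ pvFound l K)
    ∧ ((l.foldl (pvStep m) (1, 1, false)).2.2 = false →
        (l.foldl (pvStep m) (1, 1, false)).1 = 1 + (pvRun l 1 : Int)
        ∧ (l.foldl (pvStep m) (1, 1, false)).2.1 = 1 + (pvRun l (-1) : Int)) := by
  induction l using List.reverseRecOn with
  | nil =>
    constructor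
    · simp only [List.foldl_nil]
      constructor
      · intro h; simp at h
      · rintro ⟨t, ht, _⟩
        simp at ht
        omega
    · intro _
      simp [pvRun]
  | append_singleton l x ih =>
    rw [List.foldl_append] at *
    simp only [List.foldl_cons, List.foldl_nil] at *
    set r := l.foldl (pvStep m) (1, 1, false) with hr
    by_cases hf : r.2.2
    · have hstep : pvStep m r x = r := by simp [pvStep, hf]
      rw [hstep]
      refine ⟨?_, by intro h; rw [h] at hf; simp at hf⟩
      constructor
      · intro _
        exact pv_found_mono l x K (ih.1.mp hf)
      · intro _
        exact hf
    · obtain ⟨h1, h2⟩ := ih.2 (by simpa using hf)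
      have hnf : ¬ pvFound l K := by rw [← ih.1]; simpa using hf
      have hinc : (if x = 1 then r.1 + 1 else 1) = 1 + (pvRun (l ++ [x]) 1 : Int) := by
        rw [pv_run_append]
        by_cases hx : x = 1 <;> simp [hx, h1] <;> ring
      have hdec : (if x = -1 then r.2.1 + 1 else 1) = 1 + (pvRun (l ++ [x]) (-1) : Int) := by
        rw [pv_run_append]
        by_cases hx : x = -1 <;> simp [hx, h2] <;> ring
      have hstep : pvStep m r x
          = (1 + (pvRun (l ++ [x]) 1 : Int), 1 + (pvRun (l ++ [x]) (-1) : Int),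
             decide (m ≤ 1 + (pvRun (l ++ [x]) 1 : Int)) || decide (m ≤ 1 + (pvRun (l ++ [x]) (-1) : Int))) := by
        simp only [pvStep, hf, if_false, Bool.false_eq_true]
        rw [hinc, hdec]
      rw [hstep]
      constructor
      · simp only [Bool.or_eq_true, decide_eq_true_eq]
        rw [pv_found_append l x K hK]
        constructor
        · rintro (h | h)
          · right; left; omega
          · right; right; omega
        · rintro (h | h | h)
          · exact absurd h hnf
          · left; omega
          · right; omega
      · intro _
        exact ⟨rfl, rfl⟩

theorem pv_diffs_length (cs : List Char) : (pvDiffs cs).length = cs.length - 1 := by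
  simp [pvDiffs]

theorem pv_diffs_getElem (cs : List Char) (u : Nat) (h : u + 1 < cs.length) :
    (pvDiffs cs)[u]'(by rw [pv_diffs_length]; omega) = pvIsSeq (cs[u]'(by omega)) (cs[u+1]'h) := by
  simp only [pvDiffs, List.getElem_map, List.getElem_zip, List.getElem_tail]

-- A's window check at start t equals the two constant-window tests on the diff list
theorem pv_windowCheck_eq (cs : List Char) (m : Int) (t : Nat) (hm2 : 2 ≤ m)
    (ht : (t : Int) + m ≤ (cs.length : Int)) :
    pvWindowCheck cs m (t : Int)
      = (pvWin (pvDiffs cs) t (m - 1).toNat 1 || pvWin (pvDiffs cs) t (m - 1).toNat (-1)) := by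
  have hn2 : 2 ≤ cs.length := by omega
  have hmn2 : 2 ≤ m.toNat := by omega
  have htmn : t + m.toNat ≤ cs.length := by omega
  have hW : PySem.List.slice cs (some (t : Int)) (some ((t : Int) + m)) = (cs.drop t).take m.toNat := by
    rw [show ((t : Int) + m) = ((t : Int) + (m.toNat : Int)) by omega]
    exact PySem.List.slice_natCast_add cs t m.toNat
  have hdiffs : (PySem.List.pyRange 0 (m - 1) 1).map
      (fun j => pvIsSeq (PySem.List.pyGetD ((cs.drop t).take m.toNat) j ' ')
                        (PySem.List.pyGetD ((cs.drop t).take m.toNat) (j + 1) ' '))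
      = ((pvDiffs cs).drop t).take (m - 1).toNat := by
    rw [PySem.List.pyRange_one, List.map_map]
    apply List.ext_getElem
    · simp [pv_diffs_length]
      omega
    · intro j hj1 hj2
      simp only [List.getElem_map, List.getElem_range, Function.comp_apply]
      simp only [List.length_map, List.length_range] at hj1
      have hjK : j < (m - 1).toNat := by omega
      have hlenW : (List.take m.toNat (List.drop t cs)).length = m.toNat := by
        simp; omega
      have e1 : (0 : Int) + (j : Int) = ((j : Nat) : Int) := by ring
      have e2 : (j : Int) + 1 = (((j + 1 : Nat)) : Int) := by push_cast; ring
      rw [e1, e2, PySem.List.pyGetD_natCast, PySem.List.pyGetD_natCast,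
          List.getD_eq_getElem _ _ (by omega), List.getD_eq_getElem _ _ (by omega),
          List.getElem_take, List.getElem_take, List.getElem_drop, List.getElem_drop,
          List.getElem_take, List.getElem_drop, pv_diffs_getElem cs (t + j) (by omega)]
      simp [Nat.add_assoc]
  unfold pvWindowCheck pvWin
  simp only [hW, hdiffs]

-- A's loop in the main case: any-window formulation equals pvFound
theorem pv_A_main (cs : List Char) (m : Int) (hm2 : 2 ≤ m) (hn : m ≤ (cs.length : Int)) :
    ((PySem.List.pyRange 0 ((cs.length : Int) - m + 1) 1).any (fun i => pvWindowCheck cs m i) = true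
      ↔ pvFound (pvDiffs cs) (m - 1).toNat) := by
  rw [List.any_eq_true]
  constructor
  · rintro ⟨i, hmem, hp⟩
    rw [PySem.List.mem_pyRange_one] at hmem
    obtain ⟨hi0, hi1⟩ := hmem
    have hcast : ((i.toNat : Int)) = i := Int.toNat_of_nonneg hi0
    refine ⟨i.toNat, ?_, ?_⟩
    · rw [pv_diffs_length]; omega
    · rw [← Bool.or_eq_true]
      rw [← pv_windowCheck_eq cs m i.toNat hm2 (by omega)]
      rw [hcast]
      exact hp
  · rintro ⟨t, ht, hw⟩
    rw [pv_diffs_length] at ht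
    have htm : (t : Int) + m ≤ (cs.length : Int) := by omega
    refine ⟨(t : Int), ?_, ?_⟩
    · rw [PySem.List.mem_pyRange_one]; omega
    · rw [pv_windowCheck_eq cs m t hm2 htm, Bool.or_eq_true]
      exact hw

-- ===== VERDICT (by name: the statement is the Claim_ definition above) =====
theorem has_simple_sequence_spec : Claim_equal_has_simple_sequence := by
  intro pw min_len _
  unfold Spec_has_simple_sequence has_simple_sequence has_simple_sequence_alt
  set cs := pw.toList with hcs
  by_cases h1 : (cs.length : Int) < min_len
  · rw [if_pos h1, if_pos h1]
  · rw [if_neg h1, if_neg h1]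
    by_cases h2 : min_len ≤ 1
    · rw [if_pos h2]
      rw [pv_foldl_or]
      simp only [Bool.false_or]
      rw [List.any_eq_true]
      refine ⟨0, ?_, ?_⟩
      · rw [PySem.List.mem_pyRange_one]; omega
      · unfold pvWindowCheck
        rw [PySem.List.pyRange_one_eq_nil (by omega)]
        simp
    · rw [if_neg h2]
      rw [pv_foldl_or]
      simp only [Bool.false_or]
      have hB : (cs.zip cs.tail).foldl (fun st ab => pvStep min_len st (pvIsSeq ab.1 ab.2)) (1, 1, false)
          = (pvDiffs cs).foldl (pvStep min_len) (1, 1, false) := by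
        unfold pvDiffs
        rw [List.foldl_map]
      rw [hB]
      have hm : min_len = ((min_len - 1).toNat : Int) + 1 := by omega
      have hK1 : 1 ≤ (min_len - 1).toNat := by omega
      rw [Bool.eq_iff_iff]
      rw [pv_A_main cs min_len (by omega) (by omega),
          (pv_scanInv min_len (min_len - 1).toNat hm hK1 (pvDiffs cs)).1]
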